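-- pv_equiv track=rewrite | github.com/tilde-lab/ml-selection | ml_selection/data_massage/polyhedra/get_poly_from_cif.py | _shapes_count
-- ===== SOURCE A (Python) =====
-- def _shapes_count(shapes_in_faces: list[list[tuple]]) -> dict:
--     shapes_vertex_count = {}
--
--     for shape in shapes_in_faces:
--         n_vertex = len(shape)
--         done_vertexs = []
--         for pair in shape:
--             for idx_vertex in pair:
--                 if idx_vertex not in done_vertexs:
--                     done_vertexs.append(idx_vertex)
--                     if str(idx_vertex) in shapes_vertex_count:
--                         if str(n_vertex) in shapes_vertex_count[str(idx_vertex)]: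
--                             shapes_vertex_count[str(idx_vertex)][str(n_vertex)] += 1
--                         else:
--                             shapes_vertex_count[str(idx_vertex)][str(n_vertex)] = 1
--                     else:
--                         shapes_vertex_count[str(idx_vertex)] = {}
--                         shapes_vertex_count[str(idx_vertex)][str(n_vertex)] = 1
--
--     return shapes_vertex_count
-- ===== SOURCE B (Python) =====
-- def _shapes_count(shapes_in_faces):
--     # pass 1: one (str(vertex), str(n)) occurrence per distinct vertex of each shape
--     occurrences = []
--     for shape in shapes_in_faces:
--         n = str(len(shape))
--         for v in dict.fromkeys(x for pair in shape for x in pair):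
--             occurrences.append((str(v), n))
--     # pass 2: aggregate all occurrences at once
--     counts = {}
--     for key in occurrences:
--         counts[key] = counts.get(key, 0) + 1
--     # pass 3: fold the flat counts into the nested dict
--     result = {}
--     for (v, n), c in counts.items():
--         inner = result.get(v, {})
--         inner[n] = c
--         result[v] = inner
--     return result
-- ===== Notes on version B (the rewrite author's own statement) =====
-- stated objective: faster
-- what changed: Replaces A's single nested loop that increments a nested dict entry-by-entry (with a hand-rolled done-list scanned linearly for per-shape dedup) by a three-pass tabulate-then-aggregate pipeline: flatten shapes to a flat list of (vertex, n) occurrences via dict.fromkeys dedup, aggregate the whole list into one flat counter keyed by (vertex, n), then fold the counter into the nested dict.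
import Mathlib
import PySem

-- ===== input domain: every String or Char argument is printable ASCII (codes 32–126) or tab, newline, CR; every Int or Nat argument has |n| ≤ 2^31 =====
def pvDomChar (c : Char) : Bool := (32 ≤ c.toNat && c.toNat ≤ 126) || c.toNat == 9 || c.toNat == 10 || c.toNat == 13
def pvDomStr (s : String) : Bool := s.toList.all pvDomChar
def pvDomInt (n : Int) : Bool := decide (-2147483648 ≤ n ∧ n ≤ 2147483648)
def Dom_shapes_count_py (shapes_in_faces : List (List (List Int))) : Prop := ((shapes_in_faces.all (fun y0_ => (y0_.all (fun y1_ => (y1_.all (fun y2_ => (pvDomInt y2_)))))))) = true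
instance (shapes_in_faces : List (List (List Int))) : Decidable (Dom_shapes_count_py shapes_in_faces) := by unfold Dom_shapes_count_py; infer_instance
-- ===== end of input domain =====

-- B replaces A's single nested loop that increments a nested dict entry by entry (with a
-- hand-rolled done-list for per-shape dedup) by a tabulate-then-aggregate pipeline:
-- flatten to a flat occurrence list, aggregate it into one flat counter, fold into the
-- nested dict; the hash-based dedup removes A's linear done-list scans (objective: faster).

-- ===== PORT A =====
-- loop body of A's innermost 'for idx_vertex in pair' (the Python's d[str(idx)] accesses
-- are ported as getD after the 'in' check the Python makes, so they are exact)
def pvAbody (n_vertex : Int) (st : List Int × PySem.Dict String (PySem.Dict String Int))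
    (idx_vertex : Int) : List Int × PySem.Dict String (PySem.Dict String Int) :=
  if idx_vertex ∈ st.1 then st
  else
    let done := st.1 ++ [idx_vertex]
    let d := st.2
    let sv := PySem.Int.toStr idx_vertex
    let sn := PySem.Int.toStr n_vertex
    if d.contains sv then
      let inner := d.getD sv PySem.Dict.empty
      if inner.contains sn then (done, d.insert sv (inner.insert sn (inner.getD sn 0 + 1)))
      else (done, d.insert sv (inner.insert sn 1))
    else (done, d.insert sv (PySem.Dict.empty.insert sn 1))

def shapes_count_py (shapes_in_faces : List (List (List Int))) : List (String × List (String × Int)) :=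
  let shapes_vertex_count : PySem.Dict String (PySem.Dict String Int) :=
    shapes_in_faces.foldl (fun svc shape =>
      let n_vertex : Int := (shape.length : Int)
      (shape.foldl (fun st pair => pair.foldl (pvAbody n_vertex) st) (([] : List Int), svc)).2)
      PySem.Dict.empty
  shapes_vertex_count.items.map (fun q => (q.1, q.2.items))

-- ===== PORT B =====
def shapes_count_py_alt (shapes_in_faces : List (List (List Int))) : List (String × List (String × Int)) :=
  -- pass 1: one (str(vertex), str(n)) occurrence per distinct vertex of each shape
  let occurrences : List (String × String) :=
    shapes_in_faces.foldl (fun acc shape =>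
      let n := PySem.Int.toStr (shape.length : Int)
      (PySem.List.dedup shape.flatten).foldl (fun acc v => acc ++ [(PySem.Int.toStr v, n)]) acc) []
  -- pass 2: aggregate all occurrences at once
  let counts : PySem.Dict (String × String) Int :=
    occurrences.foldl (fun c key => c.insert key (c.getD key 0 + 1)) PySem.Dict.empty
  -- pass 3: fold the flat counts into the nested dict
  let result : PySem.Dict String (PySem.Dict String Int) :=
    counts.items.foldl (fun r q =>
      let inner := r.getD q.1.1 PySem.Dict.empty
      r.insert q.1.1 (inner.insert q.1.2 q.2)) PySem.Dict.empty
  result.items.map (fun q => (q.1, q.2.items))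

-- ===== PRECONDITION & SPEC =====
def Spec_shapes_count_py (shapes_in_faces : List (List (List Int))) (out : List (String × List (String × Int))) : Prop := out = shapes_count_py_alt shapes_in_faces
instance (shapes_in_faces : List (List (List Int))) (out : List (String × List (String × Int))) : Decidable (Spec_shapes_count_py shapes_in_faces out) := by unfold Spec_shapes_count_py; infer_instance

-- ===== CLAIM (what is proved, stated in full; the proofs are below) =====
def Claim_equal_shapes_count_py : Prop := ∀ (shapes_in_faces : List (List (List Int))), Dom_shapes_count_py shapes_in_faces → Spec_shapes_count_py shapes_in_faces (shapes_count_py shapes_in_faces)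

-- ===== LEMMAS AND PROOFS =====

-- the uniform per-occurrence step A performs on the nested dict
def pvStepA (d : PySem.Dict String (PySem.Dict String Int)) (p : String × String) :
    PySem.Dict String (PySem.Dict String Int) :=
  d.insert p.1 ((d.getD p.1 PySem.Dict.empty).insert p.2 ((d.getD p.1 PySem.Dict.empty).getD p.2 0 + 1))

-- the per-flat-count step B performs
def pvStepB (r : PySem.Dict String (PySem.Dict String Int)) (q : (String × String) × Int) :
    PySem.Dict String (PySem.Dict String Int) :=
  r.insert q.1.1 ((r.getD q.1.1 PySem.Dict.empty).insert q.1.2 q.2)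

-- the flat occurrence list both programs are really processing
def pvBlock (shape : List (List Int)) : List (String × String) :=
  (PySem.Set.ofList shape.flatten).map (fun v => (PySem.Int.toStr v, PySem.Int.toStr (shape.length : Int)))

def pvOcc (shapes : List (List (List Int))) : List (String × String) := shapes.flatMap pvBlock

-- the branchy loop body of A is the uniform step
lemma pvAbody_eq (n : Int) (st : List Int × PySem.Dict String (PySem.Dict String Int)) (x : Int) :
    pvAbody n st x =
      if x ∈ st.1 then st
      else (st.1 ++ [x], pvStepA st.2 (PySem.Int.toStr x, PySem.Int.toStr n)) := by
  simp only [pvAbody, pvStepA]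
  split_ifs with h1 h2 h3 <;>
    simp_all [PySem.Dict.getD_of_not_contains]

-- A's done-list loop over one shape's flat vertex list, from any starting state
lemma pvDoneLoop (n : Int) (l : List Int) (done : List Int)
    (d : PySem.Dict String (PySem.Dict String Int)) :
    l.foldl (pvAbody n) (done, d) =
      (PySem.Set.update done l,
       ((PySem.Set.ofList l).filter (fun y => !(PySem.Set.contains done y))).foldl
         (fun d x => pvStepA d (PySem.Int.toStr x, PySem.Int.toStr n)) d) := by
  induction l using List.reverseRecOn with
  | nil => simp [PySem.Set.update_nil, PySem.Set.ofList_nil]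
  | append_singleton l x ih =>
      rw [List.foldl_append, ih, List.foldl_cons, List.foldl_nil, pvAbody_eq,
        PySem.Set.ofList_append_singleton, PySem.Set.update_append, PySem.Set.update_cons,
        PySem.Set.update_nil]
      by_cases hx : x ∈ PySem.Set.update done l
      · rw [if_pos hx, PySem.Set.add_of_mem hx]
        rcases (PySem.Set.mem_update done l x).mp hx with hd | hl
        · by_cases hol : x ∈ PySem.Set.ofList l
          · rw [PySem.Set.add_of_mem hol]
          · rw [PySem.Set.add_of_not_mem hol, List.filter_append]
            simp [hd]
        · rw [PySem.Set.add_of_mem ((PySem.Set.mem_ofList l x).mpr hl)]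
      · rw [if_neg hx]
        have hd : x ∉ done := fun h => hx ((PySem.Set.mem_update done l x).mpr (Or.inl h))
        have hl : x ∉ l := fun h => hx ((PySem.Set.mem_update done l x).mpr (Or.inr h))
        rw [PySem.Set.add_of_not_mem hx,
          PySem.Set.add_of_not_mem (fun h => hl ((PySem.Set.mem_ofList l x).mp h)),
          List.filter_append, List.foldl_append]
        simp [hd]

-- A is the flat fold of pvStepA over the occurrence list
lemma pvA_eq (shapes : List (List (List Int))) :
    shapes_count_py shapes =
      ((pvOcc shapes).foldl pvStepA PySem.Dict.empty).items.map (fun q => (q.1, q.2.items)) := by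
  unfold shapes_count_py pvOcc
  have hbody : ∀ (svc : PySem.Dict String (PySem.Dict String Int)) (shape : List (List Int)),
      (shape.foldl (fun st pair => pair.foldl (pvAbody (shape.length : Int)) st)
        (([] : List Int), svc)).2 = (pvBlock shape).foldl pvStepA svc := by
    intro svc shape
    have h1 : shape.foldl (fun st pair => pair.foldl (pvAbody (shape.length : Int)) st)
        (([] : List Int), svc) = (shape.flatten).foldl (pvAbody (shape.length : Int)) ([], svc) := by
      rw [← List.flatMap_id, List.foldl_flatMap]
      rfl
    rw [h1, pvDoneLoop]
    simp [pvBlock, List.foldl_map]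
  rw [List.foldl_flatMap]
  simp only [hbody]

-- B is the fold of pvStepB over the flat counter of the same occurrence list
lemma pvB_eq (shapes : List (List (List Int))) :
    shapes_count_py_alt shapes =
      ((PySem.Dict.counter (pvOcc shapes)).items.foldl pvStepB PySem.Dict.empty).items.map
        (fun q => (q.1, q.2.items)) := by
  unfold shapes_count_py_alt pvOcc
  simp only [PySem.List.foldl_append_singleton_eq_map, PySem.List.dedup_eq_ofList,
    PySem.List.foldl_append_eq_flatMap, PySem.Dict.foldl_insert_getD_add_one_eq_counter]
  rfl

-- dedup commutes with filter
lemma pvOfList_filter {α : Type} [BEq α] [LawfulBEq α] (q : α → Bool) (l : List α) :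
    PySem.Set.ofList (l.filter q) = (PySem.Set.ofList l).filter q := by
  induction l using List.reverseRecOn with
  | nil => simp [PySem.Set.ofList_nil]
  | append_singleton l x ih =>
      rw [List.filter_append, PySem.Set.ofList_append_singleton]
      by_cases hq : q x = true
      · have hfx : List.filter q [x] = [x] := by simp [hq]
        rw [hfx, PySem.Set.ofList_append_singleton, ih]
        by_cases hx : x ∈ PySem.Set.ofList l
        · rw [PySem.Set.add_of_mem hx, PySem.Set.add_of_mem (List.mem_filter.mpr ⟨hx, hq⟩)]
        · rw [PySem.Set.add_of_not_mem hx,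
            PySem.Set.add_of_not_mem (fun h => hx (List.mem_of_mem_filter h)),
            List.filter_append, hfx]
      · have hfx : List.filter q [x] = [] := by simp [Bool.of_not_eq_true hq]
        rw [hfx, List.append_nil, ih]
        by_cases hx : x ∈ PySem.Set.ofList l
        · rw [PySem.Set.add_of_mem hx]
        · rw [PySem.Set.add_of_not_mem hx, List.filter_append, hfx, List.append_nil]

-- dedup commutes with an injective-on-the-list map
lemma pvOfList_map {α β : Type} [BEq α] [LawfulBEq α] [BEq β] [LawfulBEq β]
    (f : α → β) (l : List α) (hinj : ∀ a ∈ l, ∀ b ∈ l, f a = f b → a = b) :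
    PySem.Set.ofList (l.map f) = (PySem.Set.ofList l).map f := by
  induction l using List.reverseRecOn with
  | nil => simp [PySem.Set.ofList_nil]
  | append_singleton l x ih =>
      have hinj' : ∀ a ∈ l, ∀ b ∈ l, f a = f b → a = b := fun a ha b hb =>
        hinj a (List.mem_append_left _ ha) b (List.mem_append_left _ hb)
      rw [List.map_append, List.map_singleton, PySem.Set.ofList_append_singleton,
        PySem.Set.ofList_append_singleton, ih hinj']
      by_cases hx : x ∈ l
      · rw [PySem.Set.add_of_mem ((PySem.Set.mem_ofList l x).mpr hx),
          PySem.Set.add_of_mem (x := f x)]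
        exact List.mem_map_of_mem ((PySem.Set.mem_ofList l x).mpr hx)
      · have hfx : f x ∉ (PySem.Set.ofList l).map f := by
          intro h
          rcases List.mem_map.mp h with ⟨a, ha, hfa⟩
          have ha' : a ∈ l := (PySem.Set.mem_ofList l a).mp ha
          exact hx (hinj a (List.mem_append_left _ ha') x
            (List.mem_append_right _ (by simp)) hfa ▸ ha')
        rw [PySem.Set.add_of_not_mem hfx,
          PySem.Set.add_of_not_mem (fun h => hx ((PySem.Set.mem_ofList l x).mp h)),
          List.map_append, List.map_singleton]

-- deduping a mapped dedup is deduping the mapped list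
lemma pvOfList_map_ofList {α β : Type} [BEq α] [LawfulBEq α] [BEq β] [LawfulBEq β]
    (f : α → β) (l : List α) :
    PySem.Set.ofList ((PySem.Set.ofList l).map f) = PySem.Set.ofList (l.map f) := by
  induction l using List.reverseRecOn with
  | nil => simp [PySem.Set.ofList_nil]
  | append_singleton l x ih =>
      rw [PySem.Set.ofList_append_singleton, List.map_append, List.map_singleton,
        PySem.Set.ofList_append_singleton]
      by_cases hx : x ∈ l
      · rw [PySem.Set.add_of_mem ((PySem.Set.mem_ofList l x).mpr hx), ih,
          PySem.Set.add_of_mem (x := f x)]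
        rw [PySem.Set.mem_ofList]
        exact List.mem_map_of_mem hx
      · rw [PySem.Set.add_of_not_mem (fun h => hx ((PySem.Set.mem_ofList l x).mp h)),
          List.map_append, List.map_singleton, PySem.Set.ofList_append_singleton, ih]

-- lookups through a fold of key-dependent inserts restrict to the matching keys
lemma pvGetD_foldl_insert_key {κ ν β : Type} [BEq κ] [LawfulBEq κ] [DecidableEq κ]
    (key : β → κ) (g : ν → β → ν) (e : ν) (l : List β) (d : PySem.Dict κ ν) (v : κ) :
    (l.foldl (fun d p => d.insert (key p) (g (d.getD (key p) e) p)) d).getD v e =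
      (l.filter (fun p => key p == v)).foldl g (d.getD v e) := by
  induction l generalizing d with
  | nil => simp
  | cons p l ih =>
      rw [List.foldl_cons, ih, List.filter_cons, PySem.Dict.getD_insert]
      by_cases h : key p = v
      · simp [h]
      · simp [h, Ne.symm h]

-- one inner dict: A's per-vertex counter is B's fresh-insert of the flat counts
lemma pvInner (occ : List (String × String)) (v : String) :
    PySem.Dict.counter ((occ.filter (fun p => p.1 == v)).map (fun p => p.2)) =
      ((PySem.Set.ofList occ).filter (fun k => k.1 == v)).foldl
        (fun inner k => inner.insert k.2 ((List.count k occ : Int))) PySem.Dict.empty := by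
  have hm : PySem.Set.ofList ((occ.filter (fun p => p.1 == v)).map (fun p => p.2)) =
      ((PySem.Set.ofList occ).filter (fun k => k.1 == v)).map (fun p => p.2) := by
    rw [pvOfList_map, pvOfList_filter]
    intro a ha b hb hab
    have ha1 : a.1 = v := by simpa using (List.mem_filter.mp ha).2
    have hb1 : b.1 = v := by simpa using (List.mem_filter.mp hb).2
    exact Prod.ext (ha1.trans hb1.symm) hab
  apply PySem.Dict.ext
  rw [PySem.Dict.items_counter,
    PySem.Dict.items_foldl_insert_fresh _ (fun k => k.2)
      (fun k => ((List.count k occ : Int))) PySem.Dict.empty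
      (fun a _ => PySem.Dict.contains_empty _)
      (by rw [← hm]; exact PySem.Set.nodup_ofList _),
    hm, List.map_map]
  simp only [Function.comp_def,
    show (PySem.Dict.empty : PySem.Dict String Int).items = [] from rfl, List.nil_append]
  apply List.map_congr_left
  intro k hk
  have hk1 : k.1 = v := by simpa using (List.mem_filter.mp hk).2
  have hc : List.count k.2 ((occ.filter (fun p => p.1 == v)).map (fun p => p.2)) =
      List.count k occ := by
    rw [List.count_eq_countP, List.count_eq_countP, List.countP_map, List.countP_filter]
    apply List.countP_congr
    intro p _
    cases p with
    | mk p1 p2 =>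
        cases k with
        | mk k1 k2 =>
            subst hk1
            simp [Prod.ext_iff, and_comm]
  rw [hc]

-- the two folds build the same nested dict
lemma pvCore (occ : List (String × String)) :
    occ.foldl pvStepA PySem.Dict.empty =
      (PySem.Dict.counter occ).items.foldl pvStepB PySem.Dict.empty := by
  rw [show pvStepA = (fun (d : PySem.Dict String (PySem.Dict String Int)) (p : String × String) => d.insert p.1
        ((d.getD p.1 PySem.Dict.empty).insert p.2
          ((d.getD p.1 PySem.Dict.empty).getD p.2 0 + 1))) from rfl,
      show pvStepB = (fun r (q : (String × String) × Int) => r.insert q.1.1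
        ((r.getD q.1.1 PySem.Dict.empty).insert q.1.2 q.2)) from rfl]
  have ndA : (occ.foldl (fun (d : PySem.Dict String (PySem.Dict String Int)) (p : String × String) => d.insert p.1
        ((d.getD p.1 PySem.Dict.empty).insert p.2
          ((d.getD p.1 PySem.Dict.empty).getD p.2 0 + 1))) PySem.Dict.empty).keys.Nodup :=
    PySem.Dict.nodup_keys_foldl_insert_key occ Prod.fst _ _ PySem.Dict.nodup_keys_empty
  have ndB : ((PySem.Dict.counter occ).items.foldl
        (fun r (q : (String × String) × Int) => r.insert q.1.1
          ((r.getD q.1.1 PySem.Dict.empty).insert q.1.2 q.2)) PySem.Dict.empty).keys.Nodup :=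
    PySem.Dict.nodup_keys_foldl_insert_key _ (fun (q : (String × String) × Int) => q.1.1) _ _
      PySem.Dict.nodup_keys_empty
  apply PySem.Dict.ext
  rw [PySem.Dict.items_eq_map_keys _ ndA PySem.Dict.empty,
      PySem.Dict.items_eq_map_keys _ ndB PySem.Dict.empty]
  have hkA : (occ.foldl (fun (d : PySem.Dict String (PySem.Dict String Int)) (p : String × String) => d.insert p.1
        ((d.getD p.1 PySem.Dict.empty).insert p.2
          ((d.getD p.1 PySem.Dict.empty).getD p.2 0 + 1))) PySem.Dict.empty).keys =
      PySem.Set.ofList (occ.map Prod.fst) := by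
    rw [PySem.Dict.keys_foldl_insert_key occ Prod.fst, PySem.Dict.keys_empty,
      PySem.Set.update_nil_left]
  have hkB : ((PySem.Dict.counter occ).items.foldl
        (fun r (q : (String × String) × Int) => r.insert q.1.1
          ((r.getD q.1.1 PySem.Dict.empty).insert q.1.2 q.2)) PySem.Dict.empty).keys =
      PySem.Set.ofList (occ.map Prod.fst) := by
    rw [PySem.Dict.keys_foldl_insert_key _ (fun (q : (String × String) × Int) => q.1.1),
      PySem.Dict.keys_empty,
      PySem.Set.update_nil_left, PySem.Dict.items_counter, List.map_map]
    rw [show ((fun (q : (String × String) × Int) => q.1.1) ∘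
        (fun k => (k, (List.count k occ : Int)))) = Prod.fst from rfl]
    exact pvOfList_map_ofList Prod.fst occ
  rw [hkA, hkB]
  apply List.map_congr_left
  intro v _
  beta_reduce
  have hgd : (occ.foldl (fun (d : PySem.Dict String (PySem.Dict String Int)) (p : String × String) => d.insert p.1
        ((d.getD p.1 PySem.Dict.empty).insert p.2
          ((d.getD p.1 PySem.Dict.empty).getD p.2 0 + 1))) PySem.Dict.empty).getD v
        PySem.Dict.empty =
      ((PySem.Dict.counter occ).items.foldl
        (fun r (q : (String × String) × Int) => r.insert q.1.1
          ((r.getD q.1.1 PySem.Dict.empty).insert q.1.2 q.2)) PySem.Dict.empty).getD v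
        PySem.Dict.empty := by
    have hgdA := pvGetD_foldl_insert_key (fun (p : String × String) => p.1)
        (fun (inner : PySem.Dict String Int) (p : String × String) => inner.insert p.2 (inner.getD p.2 0 + 1))
        PySem.Dict.empty occ PySem.Dict.empty v
    have hgdB := pvGetD_foldl_insert_key (fun (q : (String × String) × Int) => q.1.1)
        (fun (inner : PySem.Dict String Int) (q : (String × String) × Int) => inner.insert q.1.2 q.2)
        PySem.Dict.empty (PySem.Dict.counter occ).items PySem.Dict.empty v
    have hA : (occ.filter (fun p => p.1 == v)).foldl
        (fun (inner : PySem.Dict String Int) (p : String × String) => inner.insert p.2 (inner.getD p.2 0 + 1))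
        PySem.Dict.empty =
      PySem.Dict.counter ((occ.filter (fun p => p.1 == v)).map (fun p => p.2)) := by
      rw [← PySem.Dict.foldl_insert_getD_add_one_eq_counter, List.foldl_map]
    have hB : ((PySem.Dict.counter occ).items.filter (fun q => q.1.1 == v)).foldl
        (fun (inner : PySem.Dict String Int) (q : (String × String) × Int) => inner.insert q.1.2 q.2)
        PySem.Dict.empty =
      ((PySem.Set.ofList occ).filter (fun k => k.1 == v)).foldl
        (fun inner k => inner.insert k.2 ((List.count k occ : Int))) PySem.Dict.empty := by
      rw [PySem.Dict.items_counter, List.filter_map, List.foldl_map]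
      rfl
    refine Eq.trans hgdA ?_
    refine Eq.trans ?_ hgdB.symm
    rw [PySem.Dict.getD_empty]
    exact hA.trans ((pvInner occ v).trans hB.symm)
  rw [hgd]

-- ===== VERDICT (by name: the statement is the Claim_ definition above) =====
theorem shapes_count_py_spec : Claim_equal_shapes_count_py := by
  intro shapes _hdom
  unfold Spec_shapes_count_py
  rw [pvA_eq, pvB_eq, pvCore]
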